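-- pv_equiv track=rewrite | github.com/ninjaravinja/QR-Code | Self-Written/qr-code.py | gf256
-- ===== SOURCE A (Python) =====
-- def gf256(exp: int) -> int:
--     """
--     Returns the value of 2**exp inside the Galois Field 256
--
--     :param exp: The exponent of 2**exp
--     :type exp: int
--     :return: Returns 2**exp in the Galois Field 256
--     :rtype: int
--     """
--
--     if exp > 255:
--         exp %= 285
--
--     if exp < 0:
--         return -1
--     if exp <= 7:
--         return 2**exp
--
--     num = (2**8)^285
--     for _ in range(8, exp):
--         num *= 2
--         if num > 255:
--             num ^= 285
--
--     return num
-- ===== SOURCE B (Python) =====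
-- def gf_mul(a: int, b: int) -> int:
--     """Carry-less multiply of a and b, then reduce modulo the GF(256) polynomial 285."""
--     p = 0
--     while b:
--         if b & 1:
--             p ^= a
--         a <<= 1
--         b >>= 1
--     shift = p.bit_length() - 9
--     while shift >= 0:
--         if (p >> (shift + 8)) & 1:
--             p ^= 285 << shift
--         shift -= 1
--     return p
--
--
-- def gf256(exp: int) -> int:
--     if exp > 255:
--         exp %= 285
--     if exp < 0:
--         return -1
--     result, base = 1, 2
--     while exp:
--         if exp & 1:
--             result = gf_mul(result, base)
--         base = gf_mul(base, base)
--         exp >>= 1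
--     return result
-- ===== Notes on version B (the rewrite author's own statement) =====
-- stated objective: alternative
-- what changed: Replaces A's linear repeated-doubling loop (O(exp) iterations with inline xor-reduction) with square-and-multiply over the bits of exp using a carry-less GF(256) multiplication helper that reduces by 285.
import Mathlib
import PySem

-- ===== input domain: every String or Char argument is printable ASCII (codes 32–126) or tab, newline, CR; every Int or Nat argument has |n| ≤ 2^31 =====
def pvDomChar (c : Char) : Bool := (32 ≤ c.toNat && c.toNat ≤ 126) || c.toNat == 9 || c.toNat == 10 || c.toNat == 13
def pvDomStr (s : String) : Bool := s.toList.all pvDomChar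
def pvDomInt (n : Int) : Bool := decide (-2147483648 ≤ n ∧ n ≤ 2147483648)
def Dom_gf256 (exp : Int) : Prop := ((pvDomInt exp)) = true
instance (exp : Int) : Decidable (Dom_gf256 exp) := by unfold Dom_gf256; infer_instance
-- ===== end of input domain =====

-- B replaces A's linear doubling loop by square-and-multiply over a carry-less GF(256)
-- multiplier (objective: alternative decomposition; same observable behaviour).

-- ===== PORT A =====
def gf256 (exp : Int) : Int :=
  let exp := if exp > 255 then PySem.Int.mod exp 285 else exp
  if exp < 0 then -1
  else if exp ≤ 7 then 2 ^ exp.toNat   -- exp ∈ [0,7] here, so 2**exp = 2 ^ exp.toNat exactly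
  else
    (PySem.List.pyRange 8 exp 1).foldl
      (fun num _ =>
        let num := num * 2
        if num > 255 then PySem.Int.bxor num 285 else num)
      (PySem.Int.bxor (2 ^ 8) 285)

-- ===== PORT B =====
-- 'while b:' of gf_mul; fuel = b.toNat suffices since b ≥ 0 halves each step (b < 0 never occurs)
def gfMulLoop : Nat → Int → Int → Int → Int
  | 0, _, _, p => p
  | fuel+1, a, b, p =>
    if b ≠ 0 then
      let p := if PySem.Int.band b 1 ≠ 0 then PySem.Int.bxor p a else p
      gfMulLoop fuel (a <<< 1) (b >>> 1) p
    else p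

-- the 'while shift >= 0:' reduction loop of gf_mul; fuel = shift+1 iterations, shift counts down
def gfRedLoop : Nat → Int → Int
  | 0, p => p
  | s+1, p =>
    let p := if PySem.Int.band (p >>> (s + 8)) 1 ≠ 0 then PySem.Int.bxor p (285 <<< s) else p
    gfRedLoop s p

def gfMul (a b : Int) : Int :=
  let p := gfMulLoop b.toNat a b 0
  gfRedLoop ((PySem.Int.bitLength p : Int) - 9 + 1).toNat p

-- 'while exp:' of gf256; fuel = exp.toNat suffices since exp ≥ 0 halves each step
def sqmLoop : Nat → Int → Int → Int → Int
  | 0, _, result, _ => result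
  | fuel+1, e, result, base =>
    if e ≠ 0 then
      let result := if PySem.Int.band e 1 ≠ 0 then gfMul result base else result
      sqmLoop fuel (e >>> 1) result (gfMul base base)
    else result

def gf256_alt (exp : Int) : Int :=
  let exp := if exp > 255 then PySem.Int.mod exp 285 else exp
  if exp < 0 then -1
  else sqmLoop exp.toNat exp 1 2

-- ===== PRECONDITION & SPEC =====
def Spec_gf256 (exp : Int) (out : Int) : Prop := out = gf256_alt exp
instance (exp : Int) (out : Int) : Decidable (Spec_gf256 exp out) := by unfold Spec_gf256; infer_instance

-- ===== CLAIM (what is proved, stated in full; the proofs are below) =====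
def Claim_equal_gf256 : Prop := ∀ (exp : Int), Dom_gf256 exp → Spec_gf256 exp (gf256 exp)

-- ===== LEMMAS AND PROOFS =====

-- after the preamble the exponent lies in [0, 285); check all 285 residues by kernel evaluation
set_option maxRecDepth 100000 in
theorem gf_key : ∀ n : Nat, n < 285 → gf256 ((n : Nat) : Int) = gf256_alt ((n : Nat) : Int) := by decide

theorem gf_A_mod (exp : Int) (h : 255 < exp) :
    gf256 exp = gf256 (PySem.Int.mod exp 285) := by
  have h0 : 0 ≤ PySem.Int.mod exp 285 := PySem.Int.mod_nonneg _ (by norm_num)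
  have h1 : PySem.Int.mod exp 285 < 285 := PySem.Int.mod_lt _ (by norm_num)
  by_cases h2 : 255 < PySem.Int.mod exp 285
  · have : PySem.Int.mod (PySem.Int.mod exp 285) 285 = PySem.Int.mod exp 285 := by
      simp [PySem.Int.mod]
    simp only [gf256, if_pos h, if_pos h2, this]
  · simp only [gf256, if_pos h, if_neg h2]

theorem gf_B_mod (exp : Int) (h : 255 < exp) :
    gf256_alt exp = gf256_alt (PySem.Int.mod exp 285) := by
  by_cases h2 : 255 < PySem.Int.mod exp 285
  · have : PySem.Int.mod (PySem.Int.mod exp 285) 285 = PySem.Int.mod exp 285 := by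
      simp [PySem.Int.mod]
    simp only [gf256_alt, if_pos h, if_pos h2, this]
  · simp only [gf256_alt, if_pos h, if_neg h2]

-- ===== VERDICT (by name: the statement is the Claim_ definition above) =====
theorem gf256_spec : Claim_equal_gf256 := by
  intro exp _
  unfold Spec_gf256
  by_cases h : 255 < exp
  · rw [gf_A_mod exp h, gf_B_mod exp h]
    have h0 : 0 ≤ PySem.Int.mod exp 285 := PySem.Int.mod_nonneg _ (by norm_num)
    have h1 : PySem.Int.mod exp 285 < 285 := PySem.Int.mod_lt _ (by norm_num)
    have := gf_key (PySem.Int.mod exp 285).toNat (by omega)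
    rwa [Int.toNat_of_nonneg h0] at this
  · by_cases hn : exp < 0
    · simp only [gf256, gf256_alt, if_neg h, if_pos hn]
    · have := gf_key exp.toNat (by omega)
      rwa [Int.ofNat_toNat, max_eq_left (by omega)] at this
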